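-- pv_equiv track=rewrite | github.com/1156054203/astair | reference_context_search_triad.py | sequence_context_set_creation
-- ===== SOURCE A (Python) =====
-- import itertools
--
-- def sequence_context_set_creation(desired_sequence, user_defined_context):
--     """Prepares sets of possible cytosine contexts."""
--     letters_top = ['A', 'C', 'T', 'a', 'c', 't']
--     if user_defined_context:
--         user = list(map(''.join, itertools.product(*zip(user_defined_context.upper(), user_defined_context.lower()))))
--     if desired_sequence == 'all':
--         CHG = [y + x + z for x in letters_top for y in ['C', 'c'] for z in ['G', 'g']]
--         CHGb = [y + x + z for x in letters_top for z in ['C', 'c'] for y in ['G', 'g']]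
--         CHH = [y + x + z for x in letters_top for y in ['C', 'c'] for z in letters_top]
--         CHHb = [y + x + z for x in letters_top for z in ['C', 'c'] for y in letters_top]
--         CG = [y + z + x for y in ['C', 'c'] for z in ['G', 'g'] for x in ['A', 'C', 'T', 'a', 'c', 't', 'g', 'G']]
--         CGb = [x+z + y for y in ['C', 'c'] for z in ['G', 'g'] for x in ['A', 'C', 'T', 'a', 'c', 't', 'g', 'G']]
--         CN = [y + x + z for x in ['N', 'n', 'A', 'C', 'T', 'a', 'c', 't'] for y in ['C', 'c'] for z in ['N', 'n']]
--         CNb = [y + x + z for x in ['N', 'n', 'A', 'C', 'T', 'a', 'c', 't'] for z in ['C', 'c'] for y in ['N', 'n']]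
--         if user_defined_context:
--             contexts = {'CHG': list(CHG), 'CHGb': list(CHGb), 'CHH': list(CHH), 'CHHb': list(CHHb), 'CG': list(CG), 'CGb': list(CGb),'CN': list(CN), 'CNb': list(CNb), 'user': list(user)}
--             all_keys = list(('CHG', 'CHGb', 'CHH', 'CHHb', 'CG', 'CGb', 'CN', 'CNb', 'user'))
--         else:
--             contexts = {'CHG': list(CHG), 'CHGb': list(CHGb), 'CHH': list(CHH), 'CHHb': list(CHHb), 'CG': list(CG), 'CGb': list(CGb), 'CN': list(CN), 'CNb': list(CNb)}
--             all_keys = list(('CHG', 'CHGb', 'CHH', 'CHHb', 'CG', 'CGb', 'CN', 'CNb'))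
--     elif desired_sequence == 'CpG':
--         CG = [y + z + x for y in ['C', 'c'] for z in ['G', 'g'] for x in ['A', 'C', 'T', 'a', 'c', 't', 'g', 'G']]
--         CGb = [x+z + y  for y in ['C', 'c'] for z in ['G', 'g'] for x in ['A', 'C', 'T', 'a', 'c', 't', 'g', 'G']]
--         if user_defined_context:
--             contexts = {'CG': list(CG), 'CGb': list(CGb), 'user': list(user)}
--             all_keys = list(( 'CG', 'CGb', 'user'))
--         else:
--             contexts = {'CG': list(CG), 'CGb': list(CGb)}
--             all_keys = list(('CG', 'CGb'))
--     elif desired_sequence == 'CHG':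
--         CHG = [y + x + z for x in letters_top for y in ['C', 'c'] for z in ['G', 'g']]
--         CHGb = [y + x + z for x in letters_top for z in ['C', 'c'] for y in ['G', 'g']]
--         if user_defined_context:
--             contexts = {'CHG': list(CHG), 'CHGb': list(CHGb), 'user': list(user)}
--             all_keys = list(( 'CHG', 'CHGb', 'user'))
--         else:
--             contexts = {'CHG': list(CHG), 'CHGb': list(CHGb)}
--             all_keys = list(('CHG', 'CHGb'))
--     elif desired_sequence == 'CHH':
--         CHH = [y + x + z for x in letters_top for y in ['C', 'c'] for z in letters_top]
--         CHHb = [y + x + z for x in letters_top for z in ['C', 'c'] for y in letters_top]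
--         if user_defined_context:
--             contexts = {'CHH': list(CHH), 'CHHb': list(CHHb), 'user': list(user)}
--             all_keys = list(( 'CHH', 'CHHb', 'user'))
--         else:
--             contexts = {'CHH': list(CHH), 'CHHb': list(CHHb)}
--             all_keys = list(('CHH', 'CHHb'))
--     return contexts, all_keys
-- ===== SOURCE B (Python) =====
-- import itertools
--
-- def sequence_context_set_creation(desired_sequence, user_defined_context):
--     """Prepares sets of possible cytosine contexts (table-driven)."""
--     H = ['A', 'C', 'T', 'a', 'c', 't']
--     Cc, Gg, Nn = ['C', 'c'], ['G', 'g'], ['N', 'n']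
--     X = ['A', 'C', 'T', 'a', 'c', 't', 'g', 'G']
--     NH = ['N', 'n', 'A', 'C', 'T', 'a', 'c', 't']
--     table = {
--         'CHG':  [y + x + z for x in H for y in Cc for z in Gg],
--         'CHGb': [y + x + z for x in H for z in Cc for y in Gg],
--         'CHH':  [y + x + z for x in H for y in Cc for z in H],
--         'CHHb': [y + x + z for x in H for z in Cc for y in H],
--         'CG':   [y + z + x for y in Cc for z in Gg for x in X],
--         'CGb':  [x + z + y for y in Cc for z in Gg for x in X],
--         'CN':   [y + x + z for x in NH for y in Cc for z in Nn],
--         'CNb':  [y + x + z for x in NH for z in Cc for y in Nn],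
--     }
--     selection = {
--         'all': ['CHG', 'CHGb', 'CHH', 'CHHb', 'CG', 'CGb', 'CN', 'CNb'],
--         'CpG': ['CG', 'CGb'],
--         'CHG': ['CHG', 'CHGb'],
--         'CHH': ['CHH', 'CHHb'],
--     }
--     keys = list(selection[desired_sequence])
--     contexts = {k: table[k] for k in keys}
--     if user_defined_context:
--         contexts['user'] = list(map(''.join, itertools.product(
--             *zip(user_defined_context.upper(), user_defined_context.lower()))))
--         keys.append('user')
--     return contexts, keys
-- ===== Notes on version B (the rewrite author's own statement) =====
-- stated objective: simpler
-- what changed: Replaced the four-way branch that rebuilds context lists and dict/key tuples per case with a single table of the eight context lists plus a name->keys selection map; contexts/keys are picked from the tables and 'user' appended once.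
import Mathlib
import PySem

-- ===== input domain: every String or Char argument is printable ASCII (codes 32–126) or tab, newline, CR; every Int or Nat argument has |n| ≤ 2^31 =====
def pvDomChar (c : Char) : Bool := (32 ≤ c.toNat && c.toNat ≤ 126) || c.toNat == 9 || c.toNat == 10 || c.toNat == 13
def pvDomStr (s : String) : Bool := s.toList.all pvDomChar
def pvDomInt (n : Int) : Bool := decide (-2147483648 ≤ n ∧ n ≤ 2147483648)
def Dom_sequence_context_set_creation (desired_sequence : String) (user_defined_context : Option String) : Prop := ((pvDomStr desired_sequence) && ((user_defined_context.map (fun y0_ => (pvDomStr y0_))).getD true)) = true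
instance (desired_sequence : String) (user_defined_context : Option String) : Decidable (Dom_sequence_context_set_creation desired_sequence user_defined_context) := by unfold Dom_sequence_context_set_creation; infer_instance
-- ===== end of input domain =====

-- B replaces A's four-way branch duplication with one table of the eight context
-- lists plus a name→keys selection map (objective: simpler).

-- itertools.product(*zip(s.upper(), s.lower())), each factor a 2-tuple of chars;
-- exact: product over the pairs, last factor varying fastest.
def pvPairsProd : List (Char × Char) → List (List Char)
  | [] => [[]]
  | (a, b) :: rest => [a, b].flatMap (fun c => (pvPairsProd rest).map (fun t => c :: t))

-- list(map(''.join, itertools.product(*zip(s.upper(), s.lower()))))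
def pvUserList (s : String) : List String :=
  (pvPairsProd ((PySem.Str.upper s).toList.zip (PySem.Str.lower s).toList)).map
    (fun t => String.ofList t)

-- ===== PORT A =====
def sequence_context_set_creation (desired_sequence : String) (user_defined_context : Option String) : (List (String × List String)) × List String :=
  let letters_top : List String := ["A", "C", "T", "a", "c", "t"]
  -- Python truthiness of user_defined_context: None and "" are falsy
  let userOpt : Option (List String) :=
    match user_defined_context with
    | none => none
    | some s => if s = "" then none else some (pvUserList s)
  if desired_sequence = "all" then
    let CHG := letters_top.flatMap (fun x => ["C", "c"].flatMap (fun y => ["G", "g"].map (fun z => y ++ x ++ z)))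
    let CHGb := letters_top.flatMap (fun x => ["C", "c"].flatMap (fun z => ["G", "g"].map (fun y => y ++ x ++ z)))
    let CHH := letters_top.flatMap (fun x => ["C", "c"].flatMap (fun y => letters_top.map (fun z => y ++ x ++ z)))
    let CHHb := letters_top.flatMap (fun x => ["C", "c"].flatMap (fun z => letters_top.map (fun y => y ++ x ++ z)))
    let CG := ["C", "c"].flatMap (fun y => ["G", "g"].flatMap (fun z => ["A", "C", "T", "a", "c", "t", "g", "G"].map (fun x => y ++ z ++ x)))
    let CGb := ["C", "c"].flatMap (fun y => ["G", "g"].flatMap (fun z => ["A", "C", "T", "a", "c", "t", "g", "G"].map (fun x => x ++ z ++ y)))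
    let CN := ["N", "n", "A", "C", "T", "a", "c", "t"].flatMap (fun x => ["C", "c"].flatMap (fun y => ["N", "n"].map (fun z => y ++ x ++ z)))
    let CNb := ["N", "n", "A", "C", "T", "a", "c", "t"].flatMap (fun x => ["C", "c"].flatMap (fun z => ["N", "n"].map (fun y => y ++ x ++ z)))
    match userOpt with
    | some user =>
        ([("CHG", CHG), ("CHGb", CHGb), ("CHH", CHH), ("CHHb", CHHb), ("CG", CG), ("CGb", CGb), ("CN", CN), ("CNb", CNb), ("user", user)],
         ["CHG", "CHGb", "CHH", "CHHb", "CG", "CGb", "CN", "CNb", "user"])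
    | none =>
        ([("CHG", CHG), ("CHGb", CHGb), ("CHH", CHH), ("CHHb", CHHb), ("CG", CG), ("CGb", CGb), ("CN", CN), ("CNb", CNb)],
         ["CHG", "CHGb", "CHH", "CHHb", "CG", "CGb", "CN", "CNb"])
  else if desired_sequence = "CpG" then
    let CG := ["C", "c"].flatMap (fun y => ["G", "g"].flatMap (fun z => ["A", "C", "T", "a", "c", "t", "g", "G"].map (fun x => y ++ z ++ x)))
    let CGb := ["C", "c"].flatMap (fun y => ["G", "g"].flatMap (fun z => ["A", "C", "T", "a", "c", "t", "g", "G"].map (fun x => x ++ z ++ y)))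
    match userOpt with
    | some user => ([("CG", CG), ("CGb", CGb), ("user", user)], ["CG", "CGb", "user"])
    | none => ([("CG", CG), ("CGb", CGb)], ["CG", "CGb"])
  else if desired_sequence = "CHG" then
    let CHG := letters_top.flatMap (fun x => ["C", "c"].flatMap (fun y => ["G", "g"].map (fun z => y ++ x ++ z)))
    let CHGb := letters_top.flatMap (fun x => ["C", "c"].flatMap (fun z => ["G", "g"].map (fun y => y ++ x ++ z)))
    match userOpt with
    | some user => ([("CHG", CHG), ("CHGb", CHGb), ("user", user)], ["CHG", "CHGb", "user"])
    | none => ([("CHG", CHG), ("CHGb", CHGb)], ["CHG", "CHGb"])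
  else if desired_sequence = "CHH" then
    let CHH := letters_top.flatMap (fun x => ["C", "c"].flatMap (fun y => letters_top.map (fun z => y ++ x ++ z)))
    let CHHb := letters_top.flatMap (fun x => ["C", "c"].flatMap (fun z => letters_top.map (fun y => y ++ x ++ z)))
    match userOpt with
    | some user => ([("CHH", CHH), ("CHHb", CHHb), ("user", user)], ["CHH", "CHHb", "user"])
    | none => ([("CHH", CHH), ("CHHb", CHHb)], ["CHH", "CHHb"])
  else ([], [])  -- Python raises UnboundLocalError here; excluded by Pre_

-- ===== PORT B =====
def sequence_context_set_creation_alt (desired_sequence : String) (user_defined_context : Option String) : (List (String × List String)) × List String :=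
  let H : List String := ["A", "C", "T", "a", "c", "t"]
  let Cc : List String := ["C", "c"]
  let Gg : List String := ["G", "g"]
  let Nn : List String := ["N", "n"]
  let X : List String := ["A", "C", "T", "a", "c", "t", "g", "G"]
  let NH : List String := ["N", "n", "A", "C", "T", "a", "c", "t"]
  let table : PySem.Dict String (List String) :=
    PySem.Dict.ofList [("CHG", H.flatMap (fun x => Cc.flatMap (fun y => Gg.map (fun z => y ++ x ++ z)))),
     ("CHGb", H.flatMap (fun x => Cc.flatMap (fun z => Gg.map (fun y => y ++ x ++ z)))),
     ("CHH", H.flatMap (fun x => Cc.flatMap (fun y => H.map (fun z => y ++ x ++ z)))),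
     ("CHHb", H.flatMap (fun x => Cc.flatMap (fun z => H.map (fun y => y ++ x ++ z)))),
     ("CG", Cc.flatMap (fun y => Gg.flatMap (fun z => X.map (fun x => y ++ z ++ x)))),
     ("CGb", Cc.flatMap (fun y => Gg.flatMap (fun z => X.map (fun x => x ++ z ++ y)))),
     ("CN", NH.flatMap (fun x => Cc.flatMap (fun y => Nn.map (fun z => y ++ x ++ z)))),
     ("CNb", NH.flatMap (fun x => Cc.flatMap (fun z => Nn.map (fun y => y ++ x ++ z))))]
  let selection : PySem.Dict String (List String) :=
    PySem.Dict.ofList [("all", ["CHG", "CHGb", "CHH", "CHHb", "CG", "CGb", "CN", "CNb"]),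
     ("CpG", ["CG", "CGb"]),
     ("CHG", ["CHG", "CHGb"]),
     ("CHH", ["CHH", "CHHb"])]
  -- selection[desired_sequence] / table[k]: KeyError (outside Pre_) rendered as []
  let keys := (selection.get? desired_sequence).getD []
  let contexts := keys.map (fun k => (k, (table.get? k).getD []))
  match user_defined_context with
  | none => (contexts, keys)
  | some s =>
      if s = "" then (contexts, keys)
      else (contexts ++ [("user", pvUserList s)], keys ++ ["user"])

-- ===== PRECONDITION & SPEC =====
-- Pre_ excludes exactly the desired_sequence values outside the four recognised
-- names, on which A raises UnboundLocalError (and B raises KeyError).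
def Pre_sequence_context_set_creation (desired_sequence : String) (user_defined_context : Option String) : Prop :=
  desired_sequence = "all" ∨ desired_sequence = "CpG" ∨ desired_sequence = "CHG" ∨ desired_sequence = "CHH"
instance (desired_sequence : String) (user_defined_context : Option String) : Decidable (Pre_sequence_context_set_creation desired_sequence user_defined_context) := by unfold Pre_sequence_context_set_creation; infer_instance

def pvWitness_sequence_context_set_creation : String × Option String := ("CpG", some "Cg")

def Spec_sequence_context_set_creation (desired_sequence : String) (user_defined_context : Option String) (out : (List (String × List String)) × List String) : Prop := out = sequence_context_set_creation_alt desired_sequence user_defined_context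
instance (desired_sequence : String) (user_defined_context : Option String) (out : (List (String × List String)) × List String) : Decidable (Spec_sequence_context_set_creation desired_sequence user_defined_context out) := by unfold Spec_sequence_context_set_creation; infer_instance

-- ===== CLAIM (what is proved, stated in full; the proofs are below) =====
def Claim_equal_sequence_context_set_creation : Prop := ∀ (desired_sequence : String) (user_defined_context : Option String), Dom_sequence_context_set_creation desired_sequence user_defined_context → Pre_sequence_context_set_creation desired_sequence user_defined_context → Spec_sequence_context_set_creation desired_sequence user_defined_context (sequence_context_set_creation desired_sequence user_defined_context)

-- ===== LEMMAS AND PROOFS =====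
theorem pv_case (ds : String)
    (h : ds = "all" ∨ ds = "CpG" ∨ ds = "CHG" ∨ ds = "CHH")
    (udc : Option String) :
    sequence_context_set_creation ds udc = sequence_context_set_creation_alt ds udc := by
  rcases h with h | h | h | h <;> subst h <;>
    (cases udc with
     | none => rfl
     | some s =>
        by_cases hs : s = ""
        · subst hs; rfl
        · simp only [sequence_context_set_creation, sequence_context_set_creation_alt,
            if_neg hs]
          rfl)

-- ===== VERDICT (by name: the statement is the Claim_ definition above) =====
theorem sequence_context_set_creation_spec : Claim_equal_sequence_context_set_creation := by
  intro ds udc _ hpre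
  exact pv_case ds hpre udc
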